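-- pv_equiv track=rewrite | github.com/szm4c/H8PW | cwiczenia5.py | wstaw_kolumne
-- ===== SOURCE A (Python) =====
-- def wstaw_kolumne(A, b, i):  #cwiczenie 10
--     n = len(A)  #ilosc wierszy
--     m = len(A[0]) #ilosc kolumn
--
--     assert len(b) == n, "kolumna musi byc tak samo dluga jak kolumny w macierzy"
--     assert i >= 0 and i <= m, "wstawiamy na istniejące miejsce"
--
--     B = [[0 for a in range(m+1)] for c in range(n)]  #nowa macierz, ktora ma o kolumne wiecej
--
--     for c in range(n):  #zapelniamy lewa strone takimi kolumnami jakie byly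
--         for a in range(i):
--             B[c][a] = A[c][a]
--
--     for j in range(n):
--             B[j][i] = b[j]
--     #uzupelniamy
--     for c in range(i+1, m+1):  #kolumna od i+1
--         for a in range(n):  #wiersz od poczatku
--             B[a][c] = A[a][c-1]
--
--     return B
-- ===== SOURCE B (Python) =====
-- def wstaw_kolumne(A, b, i):  # cwiczenie 10
--     n = len(A)   # ilosc wierszy
--     m = len(A[0])  # ilosc kolumn
--
--     assert len(b) == n, "kolumna musi byc tak samo dluga jak kolumny w macierzy"
--     assert i >= 0 and i <= m, "wstawiamy na istniejące miejsce"
--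
--     # one pass: each result row is the first i columns, the new entry, then columns i..m-1
--     return [A[j][:i] + [b[j]] + A[j][i:m] for j in range(n)]
-- ===== Notes on version B (the rewrite author's own statement) =====
-- stated objective: simpler
-- what changed: A preallocates an n x (m+1) zero matrix and fills it with three separate index-assignment loop nests (left columns, the new column, shifted right columns); B builds the result in one row-wise pass, constructing each row by slice concatenation A[j][:i] + [b[j]] + A[j][i:m].
import Mathlib
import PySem

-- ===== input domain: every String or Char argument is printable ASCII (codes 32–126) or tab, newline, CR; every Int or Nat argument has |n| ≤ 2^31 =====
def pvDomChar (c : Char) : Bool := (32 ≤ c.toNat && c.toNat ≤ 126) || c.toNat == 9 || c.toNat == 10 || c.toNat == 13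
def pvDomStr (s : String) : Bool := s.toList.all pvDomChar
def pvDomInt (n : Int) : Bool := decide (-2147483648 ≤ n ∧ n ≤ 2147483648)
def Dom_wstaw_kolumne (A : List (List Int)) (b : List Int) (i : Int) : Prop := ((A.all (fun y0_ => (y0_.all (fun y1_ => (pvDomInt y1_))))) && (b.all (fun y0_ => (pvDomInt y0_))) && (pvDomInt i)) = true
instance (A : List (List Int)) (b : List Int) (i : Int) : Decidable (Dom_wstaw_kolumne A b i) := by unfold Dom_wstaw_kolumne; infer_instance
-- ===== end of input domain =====

-- B replaces A's preallocated zero matrix and three column-region filling loops by a single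
-- row-wise pass building each result row from slices (objective: simpler).

-- ===== PORT A =====
-- Python builds a zero matrix B of shape n×(m+1), then fills the left columns, the new column i,
-- and the shifted right columns, by in-place assignments.  Assignments B[x][y] = v are ported as
-- List.modify / List.set with a Nat index: exact under Pre_ (every written index is in range there,
-- as in the Python).  range(n)/range(m+1) over a Nat length are List.range; range(i), range(i+1, m+1)
-- over Int bounds are PySem.List.pyRange.
def wstaw_kolumne (A : List (List Int)) (b : List Int) (i : Int) : List (List Int) :=
  let n := A.length
  let m := (PySem.List.pyGetD A 0 []).length
  let B0 : List (List Int) := (List.range n).map (fun _ => (List.range (m + 1)).map (fun _ => (0 : Int)))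
  let B1 := (List.range n).foldl (fun B c =>
      (PySem.List.pyRange 0 i).foldl (fun B a =>
        B.modify c (fun row => row.set a.toNat (PySem.List.pyGetD (PySem.List.pyGetD A (c : Int) []) a 0))) B) B0
  let B2 := (List.range n).foldl (fun B j =>
      B.modify j (fun row => row.set i.toNat (PySem.List.pyGetD b (j : Int) 0))) B1
  let B3 := (PySem.List.pyRange (i + 1) ((m : Int) + 1)).foldl (fun B c =>
      (List.range n).foldl (fun B a =>
        B.modify a (fun row => row.set c.toNat (PySem.List.pyGetD (PySem.List.pyGetD A (a : Int) []) (c - 1) 0))) B) B2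
  B3

-- ===== PORT B =====
-- each result row is A[j][:i] + [b[j]] + A[j][i:m]
def wstaw_kolumne_alt (A : List (List Int)) (b : List Int) (i : Int) : List (List Int) :=
  let n := A.length
  let m := (PySem.List.pyGetD A 0 []).length
  (List.range n).map (fun (j : Nat) =>
    PySem.List.slice (PySem.List.pyGetD A (j : Int) []) none (some i)
      ++ [PySem.List.pyGetD b (j : Int) 0]
      ++ PySem.List.slice (PySem.List.pyGetD A (j : Int) []) (some i) (some (m : Int)))

-- ===== PRECONDITION & SPEC =====
-- Exactly the inputs on which the Python A returns: a nonempty A (else len(A[0]) raises IndexError),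
-- b as long as A and 0 ≤ i ≤ m (the two asserts), and every row at least m long (else a read
-- A[c][a] raises IndexError).
def Pre_wstaw_kolumne (A : List (List Int)) (b : List Int) (i : Int) : Prop :=
  A ≠ [] ∧ b.length = A.length ∧ 0 ≤ i ∧ i ≤ ((A.getD 0 []).length : Int) ∧
    ∀ row ∈ A, (A.getD 0 []).length ≤ row.length
instance (A : List (List Int)) (b : List Int) (i : Int) : Decidable (Pre_wstaw_kolumne A b i) := by
  unfold Pre_wstaw_kolumne; infer_instance
def pvWitness_wstaw_kolumne : List (List Int) × List Int × Int := ([[1, 2], [3, 4]], [5, 6], 1)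

def Spec_wstaw_kolumne (A : List (List Int)) (b : List Int) (i : Int) (out : List (List Int)) : Prop := out = wstaw_kolumne_alt A b i
instance (A : List (List Int)) (b : List Int) (i : Int) (out : List (List Int)) : Decidable (Spec_wstaw_kolumne A b i out) := by unfold Spec_wstaw_kolumne; infer_instance

-- ===== CLAIM (what is proved, stated in full; the proofs are below) =====
def Claim_equal_wstaw_kolumne : Prop := ∀ (A : List (List Int)) (b : List Int) (i : Int), Dom_wstaw_kolumne A b i → Pre_wstaw_kolumne A b i → Spec_wstaw_kolumne A b i (wstaw_kolumne A b i)
-- ===== LEMMAS AND PROOFS =====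

-- a fold of row updates (set at any indices) keeps the row length
theorem pvLen_foldl_set {α β : Type} (idx : β → Nat) (val : β → α) (L : List β) (r : List α) :
    (L.foldl (fun r c => r.set (idx c) (val c)) r).length = r.length := by
  induction L generalizing r with
  | nil => rfl
  | cons c L ih => simpa [List.foldl_cons] using (ih (r.set (idx c) (val c))).trans (by simp)

-- a fold of row modifications keeps the matrix length
theorem pvLen_foldl_modify {α β : Type} (idx : β → Nat) (g : β → α → α) (L : List β) (B : List α) :
    (L.foldl (fun B c => B.modify (idx c) (g c)) B).length = B.length := by
  induction L generalizing B with
  | nil => rfl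
  | cons c L ih => simpa [List.foldl_cons] using (ih (B.modify (idx c) (g c))).trans (by simp)

-- modifying the same row twice composes
theorem pvModify_modify {α : Type} (B : List α) (c : Nat) (g h : α → α) :
    (B.modify c g).modify c h = B.modify c (fun r => h (g r)) := by
  apply List.ext_getElem?
  intro j
  simp only [List.getElem?_modify]
  cases B[j]? with
  | none => simp
  | some r =>
    show some _ = some _
    split <;> simp

-- a loop of in-place updates of one fixed row is one modification of that row
theorem pvFoldl_modify_same {α β : Type} (c : Nat) (f : β → α → α) (L : List β) (B : List α) :
    L.foldl (fun B a => B.modify c (f a)) B = B.modify c (fun r => L.foldl (fun r a => f a r) r) := by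
  induction L generalizing B with
  | nil =>
    apply List.ext_getElem?
    intro j
    simp only [List.foldl_nil, List.getElem?_modify]
    cases B[j]? <;> simp
  | cons a L ih =>
    rw [List.foldl_cons, ih, pvModify_modify]
    rfl

-- reading row j after a loop 'for c in L: B[c] := g c B[c]' over distinct row indices
theorem pvGet_foldl_modify {α : Type} (g : Nat → α → α) (L : List Nat) (hL : L.Nodup) (B : List α) (j : Nat) :
    (L.foldl (fun B c => B.modify c (g c)) B)[j]? =
      if j ∈ L then (g j) <$> B[j]? else B[j]? := by
  induction L generalizing B with
  | nil => simp
  | cons c L ih =>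
    rcases List.nodup_cons.mp hL with ⟨hc, hnd⟩
    rw [List.foldl_cons, ih hnd]
    by_cases hj : j ∈ L
    · have hne : c ≠ j := fun h => hc (h ▸ hj)
      rw [if_pos hj, if_pos (List.mem_cons_of_mem c hj), List.getElem?_modify]
      cases B[j]? <;> simp [hne]
    · by_cases hjc : j = c
      · subst hjc
        rw [if_neg hj, if_pos (List.mem_cons_self), List.getElem?_modify]
        cases B[j]? <;> simp
      · rw [if_neg hj, if_neg (by simp [hjc, hj]), List.getElem?_modify]
        cases B[j]? with
        | none => rfl
        | some r =>
          show some (if c = j then _ else r) = some r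
          rw [if_neg (fun h => hjc h.symm)]

-- the same, over 'range n' acting on a matrix of exactly n rows
theorem pvGet_foldl_modify_range {α : Type} (n : Nat) (g : Nat → α → α) (B : List α)
    (hB : B.length = n) (j : Nat) :
    ((List.range n).foldl (fun B c => B.modify c (g c)) B)[j]? = (g j) <$> B[j]? := by
  rw [pvGet_foldl_modify g _ (List.nodup_range) B j]
  by_cases hj : j < n
  · simp [hj]
  · have : B[j]? = none := by rw [List.getElem?_eq_none]; omega
    simp [this, hj]

-- a column-major double loop 'for c in Lc: for a in range(n): B[a] := g c a B[a]' acts on each row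
-- independently: row j just receives all its column updates in order
theorem pvGet_stage3 {α β : Type} (n : Nat) (g : β → Nat → α → α) (Lc : List β) (B : List α)
    (hB : B.length = n) (j : Nat) :
    (Lc.foldl (fun B c => (List.range n).foldl (fun B a => B.modify a (g c a)) B) B)[j]? =
      (fun r => Lc.foldl (fun r c => g c j r) r) <$> B[j]? := by
  induction Lc generalizing B with
  | nil => cases h : B[j]? <;> simp [h]
  | cons c Lc ih =>
    rw [List.foldl_cons,
      ih _ ((pvLen_foldl_modify (fun a => a) (g c) (List.range n) B).trans hB),
      pvGet_foldl_modify_range n (g c) B hB j]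
    cases B[j]? <;> simp

-- reading index a of a row after a loop 'for k in range(N): r[s+k] := v k'
theorem pvGet_foldl_set_range {α : Type} (N s : Nat) (v : Nat → α) (r : List α) (a : Nat) :
    ((List.range N).foldl (fun r k => r.set (s + k) (v k)) r)[a]? =
      if s ≤ a ∧ a < s + N ∧ a < r.length then some (v (a - s)) else r[a]? := by
  induction N with
  | zero =>
    rw [List.range_zero, List.foldl_nil, if_neg (by omega)]
  | succ N ih =>
    rw [List.range_succ, List.foldl_append, List.foldl_cons, List.foldl_nil,
      List.getElem?_set, pvLen_foldl_set (fun k => s + k) v]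
    by_cases h1 : s + N = a
    · rw [if_pos h1]
      subst h1
      by_cases h2 : s + N < r.length
      · rw [if_pos h2, if_pos (by omega), show s + N - s = N by omega]
      · rw [if_neg h2, if_neg (by omega), List.getElem?_eq_none (by omega)]
    · rw [if_neg h1, ih]
      by_cases h2 : s ≤ a ∧ a < s + N ∧ a < r.length
      · rw [if_pos h2, if_pos (by omega)]
      · rw [if_neg h2, if_neg (by omega)]

-- the s = 0 instance of the previous lemma, with the loop written 'r[k] := v k'
theorem pvGet_foldl_set_range0 {α : Type} (N : Nat) (v : Nat → α) (r : List α) (a : Nat) :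
    ((List.range N).foldl (fun r k => r.set k (v k)) r)[a]? =
      if a < N ∧ a < r.length then some (v a) else r[a]? := by
  have h := pvGet_foldl_set_range N 0 v r a
  simp only [Nat.zero_add, Nat.zero_le, true_and, Nat.sub_zero] at h
  exact h

-- a double loop of row modifications keeps the matrix length
theorem pvLen_foldl_foldl_modify {α β γ : Type} (idx : β → γ → Nat) (g : β → γ → α → α)
    (Lc : List β) (Ld : List γ) (B : List α) :
    (Lc.foldl (fun B c => Ld.foldl (fun B a => B.modify (idx c a) (g c a)) B) B).length = B.length := by
  induction Lc generalizing B with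
  | nil => rfl
  | cons c Lc ih => rw [List.foldl_cons, ih, pvLen_foldl_modify (idx c) (g c)]

-- a row-major double loop 'for c in range n: for a in L: B[c] := h c a B[c]' read at row j
theorem pvGet_stage1 {α γ : Type} (n : Nat) (L : List γ) (h : Nat → γ → α → α) (B : List α)
    (hB : B.length = n) (j : Nat) :
    ((List.range n).foldl (fun B c => L.foldl (fun B a => B.modify c (h c a)) B) B)[j]? =
      (fun r => L.foldl (fun r a => h j a r) r) <$> B[j]? := by
  rw [PySem.List.foldl_congr_mem (List.range n) _
      (fun B c => B.modify c (fun r => L.foldl (fun r a => h c a r) r)) _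
      (fun acc c _ => pvFoldl_modify_same c (h c) L acc)]
  exact pvGet_foldl_modify_range n _ B hB j

-- the per-row result of A's three filling loops equals B's sliced row
theorem pvRow_eq (row : List Int) (bj : Int) (m i' : Nat) (hi : i' ≤ m) (hr : m ≤ row.length) :
    ((List.range (m - i')).foldl (fun r k => r.set (i' + 1 + k) (row.getD (i' + k) 0))
        (((List.range i').foldl (fun r k => r.set k (row.getD k 0))
            ((List.range (m + 1)).map (fun _ => (0 : Int)))).set i' bj)) =
      row.take i' ++ bj :: (row.drop i').take (m - i') := by
  have hz : ((List.range (m + 1)).map (fun _ => (0 : Int))).length = m + 1 := by simp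
  have h1 : (((List.range i').foldl (fun r k => r.set k (row.getD k 0))
      ((List.range (m + 1)).map (fun _ => (0 : Int))))).length = m + 1 := by
    rw [pvLen_foldl_set (fun k => k) (fun k => row.getD k 0), hz]
  apply List.ext_getElem?
  intro a
  have hta : (List.take i' row).length = i' := by rw [List.length_take]; omega
  rw [pvGet_foldl_set_range (m - i') (i' + 1) (fun k => row.getD (i' + k) 0), List.length_set, h1,
    List.getElem?_set, h1, pvGet_foldl_set_range0 i' (fun k => row.getD k 0), hz,
    List.getElem?_append, hta]
  by_cases hA : i' + 1 ≤ a ∧ a < i' + 1 + (m - i') ∧ a < m + 1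
  · rw [if_pos hA, if_neg (show ¬ a < i' by omega), List.getElem?_cons, if_neg (by omega),
      List.getElem?_take, if_pos (show a - i' - 1 < m - i' by omega), List.getElem?_drop,
      show i' + (a - i' - 1) = a - 1 by omega, show i' + (a - (i' + 1)) = a - 1 by omega,
      List.getD_eq_getElem row 0 (show a - 1 < row.length by omega),
      List.getElem?_eq_getElem (show a - 1 < row.length by omega)]
  · rw [if_neg hA]
    by_cases hB : i' = a
    · rw [if_pos hB, if_pos (by omega), if_neg (show ¬ a < i' by omega),
        show a - i' = 0 by omega, List.getElem?_cons, if_pos rfl]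
    · rw [if_neg hB]
      by_cases hC : a < i'
      · rw [if_pos (show a < i' ∧ a < m + 1 by omega), if_pos hC,
          List.getElem?_take, if_pos hC,
          List.getD_eq_getElem row 0 (show a < row.length by omega),
          List.getElem?_eq_getElem (show a < row.length by omega)]
      · -- a > m : both sides out of range
        rw [if_neg (by omega), List.getElem?_map,
          List.getElem?_eq_none (show (List.range (m + 1)).length ≤ a by rw [List.length_range]; omega),
          if_neg hC, List.getElem?_cons, if_neg (by omega), List.getElem?_take, if_neg (by omega)]
        rfl

-- ===== VERDICT (by name: the statement is the Claim_ definition above) =====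
theorem wstaw_kolumne_spec : Claim_equal_wstaw_kolumne := by
  intro A b i _ hpre
  obtain ⟨hne, hb, hi0, him, hrows⟩ := hpre
  unfold Spec_wstaw_kolumne wstaw_kolumne wstaw_kolumne_alt
  simp only [PySem.List.pyGetD_zero]
  apply List.ext_getElem?
  intro j
  by_cases hj : j < A.length
  · rw [pvGet_stage3 A.length
        (fun (c : Int) (a : Nat) (r : List Int) => r.set c.toNat (PySem.List.pyGetD (PySem.List.pyGetD A (a : Int) []) (c - 1) 0))
        (PySem.List.pyRange (i + 1) ((A.getD 0 []).length + 1)) _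
        (by rw [pvLen_foldl_modify (fun c => c), pvLen_foldl_foldl_modify (fun c _ => c)]; simp) j,
      pvGet_foldl_modify_range A.length
        (fun (c : Nat) (row : List Int) => row.set i.toNat (PySem.List.pyGetD b (c : Int) 0)) _
        (by rw [pvLen_foldl_foldl_modify (fun c _ => c)]; simp) j,
      pvGet_stage1 A.length (PySem.List.pyRange 0 i)
        (fun (c : Nat) (a : Int) (r : List Int) => r.set a.toNat (PySem.List.pyGetD (PySem.List.pyGetD A (c : Int) []) a 0)) _
        (by simp) j,
      List.getElem?_map, List.getElem?_map, List.getElem?_range hj]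
    -- both sides are now 'some' of a row; reduce to the row equality
    simp only [Option.map_eq_map, Option.map_some, Option.some_inj]
    have hrowmem : A.getD j [] ∈ A := by
      rw [List.getD_eq_getElem A [] hj]; exact List.getElem_mem hj
    have hrl : (A.getD 0 []).length ≤ (A.getD j []).length := hrows _ hrowmem
    have hi' : i.toNat ≤ (A.getD 0 []).length := by omega
    -- B's row: slices are take / drop-take
    rw [PySem.List.pyGetD_natCast, PySem.List.pyGetD_natCast,
      PySem.List.slice_to _ hi0, PySem.List.slice_toNat _ hi0 (by positivity)]
    -- A's left-fill loop over range(i) as a loop over Nat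
    rw [PySem.List.pyRange_one 0 i, List.foldl_map,
      PySem.List.foldl_congr_mem _ _
        (fun (r : List Int) (k : Nat) => r.set k ((A.getD j []).getD k 0)) _
        (by
          intro acc k hk
          rw [List.mem_range] at hk
          have h0 : ((0 : Int) + (k : Int)).toNat = k := by omega
          have h2 : (0 : Int) + (k : Int) = (k : Int) := by omega
          rw [h0, h2, PySem.List.pyGetD_natCast])]
    -- A's right-fill loop over range(i+1, m+1) as a loop over Nat
    rw [PySem.List.pyRange_one (i + 1) ((A.getD 0 []).length + 1), List.foldl_map,
      show ((((A.getD 0 []).length : Int) + 1) - (i + 1)).toNat = (A.getD 0 []).length - i.toNat by omega,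
      PySem.List.foldl_congr_mem _ _
        (fun (r : List Int) (k : Nat) => r.set (i.toNat + 1 + k) ((A.getD j []).getD (i.toNat + k) 0)) _
        (by
          intro acc k hk
          have h0 : ((i + 1) + (k : Int)).toNat = i.toNat + 1 + k := by omega
          have h2 : (i + 1) + (k : Int) - 1 = ((i.toNat + k : Nat) : Int) := by omega
          rw [h0, h2, PySem.List.pyGetD_natCast])]
    rw [show (i - 0).toNat = i.toNat from by omega, Int.toNat_natCast]
    rw [pvRow_eq (A.getD j []) (b.getD j 0) (A.getD 0 []).length i.toNat hi' hrl]
    simp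
  · rw [List.getElem?_eq_none, List.getElem?_eq_none]
    · simp; omega
    · rw [pvLen_foldl_foldl_modify (fun _ a => a), pvLen_foldl_modify (fun c => c),
        pvLen_foldl_foldl_modify (fun c _ => c)]
      simp; omega
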